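-- pv_equiv track=rewrite | github.com/pypi-data/pypi-mirror-76 | packages/python-lifelib/python-lifelib-2.3.11.tar.gz/python-lifelib-2.3.11/lifelib/genera/rulefiles/automorph.py | subdets
-- ===== SOURCE A (Python) =====
-- from itertools import combinations, permutations
--
-- def subdets(pts):
--     '''
--     Compute determinants of all (n choose d) size-d subsets of n
--     points in Z^d.
--     '''
--
--     n = len(pts)
--     d = len(pts[0])
--     s = {tuple([]): 1}
--
--     for e in range(1, d+1):
--         for t in combinations(range(n), e):
--             t = tuple(t)
--
--             sgn = 1
--             val = 0
--
--             for i in range(e):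
--                 subt = t[:i] + t[i+1:]
--                 val += s[subt] * pts[t[i]][-e] * sgn
--                 sgn = 0 - sgn
--
--             s[t] = val
--
--     return s
-- ===== SOURCE B (Python) =====
-- from itertools import combinations
--
-- def subdets(pts):
--     '''
--     Compute determinants of all (n choose d) size-d subsets of n
--     points in Z^d.
--     '''
--
--     n = len(pts)
--     d = len(pts[0])
--
--     def det(t):
--         # determinant of the len(t) x len(t) matrix formed by the last
--         # len(t) coordinates of the rows (points) indexed by t, via
--         # direct cofactor recursion (no memo table)
--         e = len(t)
--         if e == 0:
--             return 1
--         return sum((-1) ** i * pts[t[i]][-e] * det(t[:i] + t[i + 1:])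
--                    for i in range(e))
--
--     return {t: det(t) for e in range(d + 1) for t in combinations(range(n), e)}
-- ===== Notes on version B (the rewrite author's own statement) =====
-- stated objective: simpler
-- what changed: B replaces A's bottom-up dynamic programming over a dict of previously stored sub-subset determinants with a direct per-subset cofactor recursion (a local det helper) and a single dict comprehension.
import Mathlib
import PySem

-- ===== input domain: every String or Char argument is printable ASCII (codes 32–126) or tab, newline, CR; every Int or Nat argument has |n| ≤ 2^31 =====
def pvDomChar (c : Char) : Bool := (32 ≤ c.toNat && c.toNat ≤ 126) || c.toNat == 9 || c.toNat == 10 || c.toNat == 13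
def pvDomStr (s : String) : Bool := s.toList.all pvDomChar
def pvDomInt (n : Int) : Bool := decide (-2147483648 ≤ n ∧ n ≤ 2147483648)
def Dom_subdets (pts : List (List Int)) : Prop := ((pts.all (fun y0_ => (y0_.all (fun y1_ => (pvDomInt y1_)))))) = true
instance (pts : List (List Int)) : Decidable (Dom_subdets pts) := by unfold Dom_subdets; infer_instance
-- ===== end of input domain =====

-- B computes each subset's determinant by a direct cofactor recursion per subset instead of
-- A's bottom-up dict DP over previously stored sub-subset values; objective: simpler (not faster).

-- shared transliteration helpers for the source text both Pythons contain:
-- pvRemove t i  =  t[:i] + t[i+1:]        pvMat pts e t i  =  pts[t[i]][-e]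
def pvRemove (t : List Int) (i : Nat) : List Int :=
  PySem.List.slice t none (some (i : Int)) ++ PySem.List.slice t (some ((i : Int) + 1)) none

def pvMat (pts : List (List Int)) (e : Int) (t : List Int) (i : Nat) : Int :=
  PySem.List.pyGetD (PySem.List.pyGetD pts (PySem.List.pyGetD t (i : Int) 0) []) (0 - e) 0

-- ===== PORT A =====
def subdets (pts : List (List Int)) : List (List Int × Int) :=
  let n : Nat := pts.length
  let d : Nat := (pts.headD []).length
  let s0 : PySem.Dict (List Int) Int := PySem.Dict.insert PySem.Dict.empty ([] : List Int) 1
  ((PySem.List.pyRange 1 ((d : Int) + 1) 1).foldl (fun s e =>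
      (PySem.List.combinations (PySem.List.pyRange 0 (n : Int) 1) e.toNat).foldl (fun s t =>
        let sv := (List.range e.toNat).foldl
          (fun (sv : Int × Int) i =>
            (0 - sv.1, sv.2 + s.getD (pvRemove t i) 0 * pvMat pts e t i * sv.1))
          (1, 0)
        s.insert t sv.2) s) s0).items

-- ===== PORT B =====
def detB (pts : List (List Int)) : Nat → List Int → Int
  | 0, _ => 1
  | e + 1, t =>
    (List.range (e + 1)).foldl
      (fun acc i => acc + (-1 : Int) ^ i * pvMat pts ((e : Int) + 1) t i * detB pts e (pvRemove t i)) 0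

def subdets_alt (pts : List (List Int)) : List (List Int × Int) :=
  let n : Nat := pts.length
  let d : Nat := (pts.headD []).length
  ((List.range (d + 1)).foldl (fun s e =>
      (PySem.List.combinations (PySem.List.pyRange 0 (n : Int) 1) e).foldl
        (fun s t => s.insert t (detB pts e t)) s)
    (PySem.Dict.empty : PySem.Dict (List Int) Int)).items

-- ===== PRECONDITION & SPEC =====
-- Pre_ excludes exactly the inputs where the Python A raises: an empty pts (IndexError at pts[0])
-- and inputs with a row shorter than min(d, n), on which pts[t[i]][-e] raises IndexError.
def Pre_subdets (pts : List (List Int)) : Prop :=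
  pts ≠ [] ∧ ∀ r ∈ pts, min (pts.headD []).length pts.length ≤ r.length
instance (pts : List (List Int)) : Decidable (Pre_subdets pts) := by unfold Pre_subdets; infer_instance

def pvWitness_subdets : List (List Int) := [[1, 0], [0, 1]]

def Spec_subdets (pts : List (List Int)) (out : List (List Int × Int)) : Prop := out = subdets_alt pts
instance (pts : List (List Int)) (out : List (List Int × Int)) : Decidable (Spec_subdets pts out) := by unfold Spec_subdets; infer_instance

-- ===== CLAIM (what is proved, stated in full; the proofs are below) =====
def Claim_equal_subdets : Prop := ∀ (pts : List (List Int)), Dom_subdets pts → Pre_subdets pts → Spec_subdets pts (subdets pts)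

-- ===== LEMMAS AND PROOFS =====

-- alternating sum c i₀ - (c i₁ - (c i₂ - …)) over an index list
def altsum (c : Nat → Int) : List Nat → Int
  | [] => 0
  | i :: l => c i - altsum c l

theorem altsum_congr (c₁ c₂ : Nat → Int) (l : List Nat) (h : ∀ i ∈ l, c₁ i = c₂ i) :
    altsum c₁ l = altsum c₂ l := by
  induction l with
  | nil => rfl
  | cons i l ih =>
    simp only [altsum, h i (by simp), ih (fun j hj => h j (by simp [hj]))]

-- A's (sgn, val) loop computes an alternating sum
theorem foldl_sgn (c : Nat → Int) (l : List Nat) : ∀ (sg v : Int),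
    l.foldl (fun (p : Int × Int) i => (0 - p.1, p.2 + c i * p.1)) (sg, v)
      = ((-1 : Int) ^ l.length * sg, v + sg * altsum c l) := by
  induction l with
  | nil => intro sg v; simp [altsum]
  | cons i l ih =>
    intro sg v
    simp only [List.foldl_cons, ih, altsum, List.length_cons, pow_succ]
    simp only [Prod.mk.injEq]
    constructor <;> ring

-- B's signed-sum loop computes the same alternating sum
theorem foldl_alt (c : Nat → Int) : ∀ (n j : Nat) (a : Int),
    (List.range' j n).foldl (fun acc i => acc + (-1 : Int) ^ i * c i) a
      = a + (-1 : Int) ^ j * altsum c (List.range' j n) := by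
  intro n
  induction n with
  | zero => intro j a; simp [altsum]
  | succ n ih =>
    intro j a
    rw [List.range'_succ]
    simp only [List.foldl_cons, ih, altsum, pow_succ]
    ring

theorem pvRemove_eq (t : List Int) (i : Nat) : pvRemove t i = t.eraseIdx i := by
  rw [pvRemove, PySem.List.slice_to_natCast,
    show ((i : Int) + 1) = ((i + 1 : Nat) : Int) by push_cast; ring,
    PySem.List.slice_from_natCast]
  exact (List.eraseIdx_eq_take_drop_succ t i).symm

theorem detB_succ (pts : List (List Int)) (e : Nat) (t : List Int) :
    detB pts (e + 1) t
      = altsum (fun i => pvMat pts ((e : Int) + 1) t i * detB pts e (pvRemove t i)) (List.range (e + 1)) := by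
  show (List.range (e + 1)).foldl _ 0 = _
  rw [show (fun (acc : Int) (i : Nat) =>
        acc + (-1 : Int) ^ i * pvMat pts ((e : Int) + 1) t i * detB pts e (pvRemove t i))
      = (fun (acc : Int) (i : Nat) =>
        acc + (-1 : Int) ^ i * (pvMat pts ((e : Int) + 1) t i * detB pts e (pvRemove t i)))
      from by funext acc i; ring,
    List.range_eq_range', foldl_alt]
  simp

-- the dict invariant: every stored subset of size ≤ e holds its cofactor-recursion determinant
def DInv (pts : List (List Int)) (rng : List Int) (e : Nat) (s : PySem.Dict (List Int) Int) : Prop :=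
  ∀ u : List Int, u.Sublist rng → u.length ≤ e → s.getD u 0 = detB pts u.length u

theorem inner_val (pts : List (List Int)) (rng : List Int) (e : Nat) (t : List Int)
    (s : PySem.Dict (List Int) Int) (ht : t.Sublist rng) (hl : t.length = e + 1)
    (hs : DInv pts rng e s) :
    altsum (fun i => s.getD (pvRemove t i) 0 * pvMat pts ((e : Int) + 1) t i) (List.range (e + 1))
      = detB pts (e + 1) t := by
  rw [detB_succ]
  apply altsum_congr
  intro i hi
  have hi' : i < e + 1 := List.mem_range.mp hi
  have hlen : (t.eraseIdx i).length = e := by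
    rw [List.length_eraseIdx_of_lt (by omega)]; omega
  have hv := hs (t.eraseIdx i) ((List.eraseIdx_sublist t i).trans ht) (by omega)
  rw [pvRemove_eq, hv, hlen, mul_comm]

theorem stage (pts : List (List Int)) (rng : List Int) (e : Nat) :
    ∀ (c : List (List Int)) (s : PySem.Dict (List Int) Int),
      (∀ t ∈ c, t.Sublist rng ∧ t.length = e + 1) → DInv pts rng e s →
      (c.foldl (fun s t => s.insert t
          (((List.range (e + 1)).foldl
            (fun (sv : Int × Int) i =>
              (0 - sv.1, sv.2 + s.getD (pvRemove t i) 0 * pvMat pts ((e : Int) + 1) t i * sv.1))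
            (1, 0)).2)) s
        = c.foldl (fun s t => s.insert t (detB pts (e + 1) t)) s)
      ∧ DInv pts rng e (c.foldl (fun s t => s.insert t (detB pts (e + 1) t)) s)
      ∧ ∀ u : List Int, u.Sublist rng → u.length = e + 1 →
          (u ∈ c ∨ s.getD u 0 = detB pts (e + 1) u) →
          (c.foldl (fun s t => s.insert t (detB pts (e + 1) t)) s).getD u 0 = detB pts (e + 1) u := by
  intro c
  induction c with
  | nil =>
    intro s hc hs
    refine ⟨rfl, hs, fun u hu hl h => ?_⟩
    rcases h with h | h
    · exact absurd h (List.not_mem_nil)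
    · exact h
  | cons t c ih =>
    intro s hc hs
    obtain ⟨ht, hl⟩ := hc t (by simp)
    have hval : ((List.range (e + 1)).foldl
        (fun (sv : Int × Int) i =>
          (0 - sv.1, sv.2 + s.getD (pvRemove t i) 0 * pvMat pts ((e : Int) + 1) t i * sv.1))
        (1, 0)).2 = detB pts (e + 1) t := by
      rw [foldl_sgn]
      simpa using inner_val pts rng e t s ht hl hs
    have hs' : DInv pts rng e (s.insert t (detB pts (e + 1) t)) := by
      intro u hu hul
      have hne : u ≠ t := fun h => by subst h; omega
      rw [PySem.Dict.getD_insert_of_ne _ _ _ hne]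
      exact hs u hu hul
    obtain ⟨heq, hinv, hlook⟩ := ih (s.insert t (detB pts (e + 1) t))
      (fun t' ht' => hc t' (by simp [ht'])) hs'
    refine ⟨?_, hinv, ?_⟩
    · simp only [List.foldl_cons, hval, heq]
    · intro u hu hul h
      apply hlook u hu hul
      rcases h with h | h
      · rcases List.mem_cons.mp h with h | h
        · subst h
          exact Or.inr (by rw [PySem.Dict.getD_insert_self])
        · exact Or.inl h
      · by_cases hut : u = t
        · subst hut
          exact Or.inr (by rw [PySem.Dict.getD_insert_self])
        · exact Or.inr (by rw [PySem.Dict.getD_insert_of_ne _ _ _ hut]; exact h)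

theorem stage_all (pts : List (List Int)) (rng : List Int) (e : Nat)
    (s : PySem.Dict (List Int) Int) (hs : DInv pts rng e s) :
    ((PySem.List.combinations rng (e + 1)).foldl (fun s t => s.insert t
        (((List.range (e + 1)).foldl
          (fun (sv : Int × Int) i =>
            (0 - sv.1, sv.2 + s.getD (pvRemove t i) 0 * pvMat pts ((e : Int) + 1) t i * sv.1))
          (1, 0)).2)) s
      = (PySem.List.combinations rng (e + 1)).foldl (fun s t => s.insert t (detB pts (e + 1) t)) s)
    ∧ DInv pts rng (e + 1)
        ((PySem.List.combinations rng (e + 1)).foldl (fun s t => s.insert t (detB pts (e + 1) t)) s) := by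
  have hmem : ∀ t ∈ PySem.List.combinations rng (e + 1), t.Sublist rng ∧ t.length = e + 1 :=
    fun t ht => (PySem.List.mem_combinations_iff rng (e + 1) t).mp ht
  obtain ⟨heq, hinv, hlook⟩ := stage pts rng e (PySem.List.combinations rng (e + 1)) s hmem hs
  refine ⟨heq, fun u hu hul => ?_⟩
  by_cases hl : u.length = e + 1
  · rw [hl]
    exact hlook u hu hl (Or.inl ((PySem.List.mem_combinations_iff rng (e + 1) u).mpr ⟨hu, hl⟩))
  · exact hinv u hu (by omega)

theorem outer (pts : List (List Int)) (rng : List Int) :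
    ∀ (m e : Nat) (s : PySem.Dict (List Int) Int), DInv pts rng e s →
    (PySem.List.pyRange ((e : Int) + 1) ((e : Int) + 1 + (m : Int)) 1).foldl (fun s e =>
        (PySem.List.combinations rng e.toNat).foldl (fun s t =>
          s.insert t
            (((List.range e.toNat).foldl
              (fun (sv : Int × Int) i =>
                (0 - sv.1, sv.2 + s.getD (pvRemove t i) 0 * pvMat pts e t i * sv.1))
              (1, 0)).2)) s) s
      = (List.range' (e + 1) m).foldl (fun s e =>
          (PySem.List.combinations rng e).foldl (fun s t => s.insert t (detB pts e t)) s) s := by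
  intro m
  induction m with
  | zero =>
    intro e s _
    norm_num
  | succ m ih =>
    intro e s hs
    rw [show ((e : Int) + 1 + ((m + 1 : Nat) : Int)) = ((e : Int) + 1) + 1 + (m : Int) by
        push_cast; ring,
      PySem.List.pyRange_one_cons (by omega), List.range'_succ]
    simp only [List.foldl_cons]
    simp only [show ((e : Int) + 1).toNat = e + 1 from by omega]
    rw [(stage_all pts rng e s hs).1]
    have h2 := ih (e + 1)
      ((PySem.List.combinations rng (e + 1)).foldl (fun s t => s.insert t (detB pts (e + 1) t)) s)
      (stage_all pts rng e s hs).2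
    exact h2

-- ===== VERDICT (by name: the statement is the Claim_ definition above) =====
theorem subdets_spec : Claim_equal_subdets := by
  intro pts _ _
  show subdets pts = subdets_alt pts
  have h0 : DInv pts (PySem.List.pyRange 0 (pts.length : Int) 1) 0
      (PySem.Dict.insert PySem.Dict.empty ([] : List Int) 1) := by
    intro u hu hul
    have hnil : u = [] := List.eq_nil_of_length_eq_zero (by omega)
    subst hnil
    rw [PySem.Dict.getD_insert_self]
    rfl
  have hout := outer pts (PySem.List.pyRange 0 (pts.length : Int) 1)
      ((pts.headD []).length) 0 (PySem.Dict.insert PySem.Dict.empty ([] : List Int) 1) h0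
  rw [show (((0 : Nat) : Int) + 1) = (1 : Int) by norm_num,
    show ((1 : Int) + (((pts.headD []).length : Nat) : Int))
        = (((pts.headD []).length : Int) + 1) by ring] at hout
  unfold subdets subdets_alt
  simp only []
  congr 1
  rw [List.range_eq_range', List.range'_succ]
  simp only [List.foldl_cons, PySem.List.combinations_zero]
  exact hout
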